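-- pv_equiv track=rewrite | github.com/praxstack/volcengine-OpenViking | benchmark/custom/session_contention_benchmark.py | iter_resource_tree_uris
-- ===== SOURCE A (Python) =====
-- from typing import Any, Awaitable, Callable, Dict, Iterable, List, Optional, Sequence
--
-- def iter_resource_tree_uris(root_uri: str) -> List[str]:
--     prefix = "viking://resources"
--     normalized = root_uri.rstrip("/")
--     if not normalized.startswith(prefix):
--         return [normalized]
--     tail = normalized[len(prefix) :].strip("/")
--     uris = [prefix]
--     current = prefix
--     for part in tail.split("/"):
--         if not part:
--             continue
--         current = f"{current}/{part}"
--         uris.append(current)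
--     return uris[1:]
-- ===== SOURCE B (Python) =====
-- def iter_resource_tree_uris(root_uri):
--     prefix = "viking://resources"
--     normalized = root_uri.rstrip("/")
--     if not normalized.startswith(prefix):
--         return [normalized]
--     tail = normalized[len(prefix):].strip("/")
--     parts = [p for p in tail.split("/") if p]
--     return [prefix + "/" + "/".join(parts[:i]) for i in range(1, len(parts) + 1)]
-- ===== Notes on version B (the rewrite author's own statement) =====
-- stated objective: idiomatic
-- what changed: Replaces A's loop that threads a running accumulator string (seeding the list with the prefix and dropping it at the end) with a filtered parts list and a comprehension that rebuilds each cumulative URI by joining a growing slice of the parts.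
import Mathlib
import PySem

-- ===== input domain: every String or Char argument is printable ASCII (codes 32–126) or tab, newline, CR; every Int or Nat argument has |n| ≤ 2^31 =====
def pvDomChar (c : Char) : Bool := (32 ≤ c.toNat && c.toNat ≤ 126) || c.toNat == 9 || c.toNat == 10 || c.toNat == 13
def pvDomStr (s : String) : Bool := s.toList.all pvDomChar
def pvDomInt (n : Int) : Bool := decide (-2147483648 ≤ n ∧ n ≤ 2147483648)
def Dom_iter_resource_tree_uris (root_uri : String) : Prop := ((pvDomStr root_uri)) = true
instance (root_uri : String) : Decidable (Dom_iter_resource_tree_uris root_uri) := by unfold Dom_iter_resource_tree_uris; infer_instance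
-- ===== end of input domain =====

-- B rebuilds each cumulative URI by joining a growing slice of the part list instead of
-- threading a running accumulator list (objective: idiomatic; same cost).

-- rstrip("/") with an explicit char set is not in PySem; ported by hand, exact:
-- it removes exactly the maximal run of trailing '/' characters.
-- (Both Pythons contain this identical line, so the helper is shared.)
def pvRstripSlash (cs : List Char) : List Char :=
  (cs.reverse.dropWhile (fun c => c == '/')).reverse

-- ===== PORT A =====
def iter_resource_tree_uris (root_uri : String) : List String :=
  let pfx := "viking://resources".toList
  let normalized := pvRstripSlash root_uri.toList
  if PySem.Chars.startswith normalized pfx = false then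
    [String.ofList normalized]
  else
    let tail := PySem.Chars.stripChars
      (PySem.Chars.slice normalized (some (pfx.length : Int)) none) "/".toList
    let st := (PySem.Chars.splitOn tail "/".toList).foldl
      (fun (st : List (List Char) × List Char) part =>
        if part = [] then st
        else
          let cur := st.2 ++ '/' :: part
          (st.1 ++ [cur], cur))
      ([pfx], pfx)
    (PySem.List.slice st.1 (some 1) none).map String.ofList

-- ===== PORT B =====
def iter_resource_tree_uris_alt (root_uri : String) : List String :=
  let pfx := "viking://resources".toList
  let normalized := pvRstripSlash root_uri.toList
  if PySem.Chars.startswith normalized pfx = false then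
    [String.ofList normalized]
  else
    let tail := PySem.Chars.stripChars
      (PySem.Chars.slice normalized (some (pfx.length : Int)) none) "/".toList
    let parts := (PySem.Chars.splitOn tail "/".toList).filter (fun p => ¬ p = [])
    (PySem.List.pyRange 1 ((parts.length : Int) + 1)).map
      (fun i => String.ofList
        (pfx ++ '/' :: PySem.Chars.join "/".toList (PySem.List.slice parts none (some i))))

-- ===== PRECONDITION & SPEC =====
def Spec_iter_resource_tree_uris (root_uri : String) (out : List String) : Prop := out = iter_resource_tree_uris_alt root_uri
instance (root_uri : String) (out : List String) : Decidable (Spec_iter_resource_tree_uris root_uri out) := by unfold Spec_iter_resource_tree_uris; infer_instance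

-- ===== CLAIM (what is proved, stated in full; the proofs are below) =====
def Claim_equal_iter_resource_tree_uris : Prop := ∀ (root_uri : String), Dom_iter_resource_tree_uris root_uri → Spec_iter_resource_tree_uris root_uri (iter_resource_tree_uris root_uri)

-- ===== LEMMAS AND PROOFS =====

-- A's loop body, abstracted
def pvStep (st : List (List Char) × List Char) (part : List Char) : List (List Char) × List Char :=
  if part = [] then st
  else
    let cur := st.2 ++ '/' :: part
    (st.1 ++ [cur], cur)

-- the chain of cumulative values A's loop produces (on a part list without empties)
def pvChain (cur : List Char) : List (List Char) → List (List Char)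
  | [] => []
  | p :: ps => (cur ++ '/' :: p) :: pvChain (cur ++ '/' :: p) ps

theorem pvFoldl_filter (parts : List (List Char)) (st : List (List Char) × List Char) :
    parts.foldl pvStep st = (parts.filter (fun p => ¬ p = [])).foldl pvStep st := by
  induction parts generalizing st with
  | nil => rfl
  | cons p ps ih =>
    by_cases h : p = [] <;> simp [h, pvStep, ih]

theorem pvFoldl_chain (parts : List (List Char)) (acc : List (List Char)) (cur : List Char)
    (h : ∀ p ∈ parts, ¬ p = []) :
    (parts.foldl pvStep (acc, cur)).1 = acc ++ pvChain cur parts := by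
  induction parts generalizing acc cur with
  | nil => simp [pvChain]
  | cons p ps ih =>
    have hp : ¬ p = [] := h p (by simp)
    simp only [List.foldl_cons, pvStep, hp, pvChain]
    rw [ih _ _ (fun q hq => h q (by simp [hq]))]
    simp

theorem pvChain_eq_map (parts : List (List Char)) (cur : List Char) :
    pvChain cur parts =
      (List.range parts.length).map
        (fun k => cur ++ '/' :: PySem.Chars.join ['/'] (parts.take (k + 1))) := by
  induction parts generalizing cur with
  | nil => simp [pvChain]
  | cons p ps ih =>
    simp only [pvChain, List.length_cons, List.range_succ_eq_map, List.map_cons, List.map_map]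
    refine List.cons_eq_cons.mpr ⟨?_, ?_⟩
    · simp [PySem.Chars.join_singleton]
    · rw [ih (cur ++ '/' :: p)]
      apply List.map_congr_left
      intro k hk
      simp only [List.mem_range] at hk
      simp only [Function.comp_apply, List.take_succ_cons]
      have hne : ps.take (k + 1) ≠ [] := by
        intro hnil
        rcases List.take_eq_nil_iff.mp hnil with h | h
        · omega
        · rw [h] at hk; simp at hk
      obtain ⟨q, rest, hqr⟩ := List.exists_cons_of_ne_nil hne
      rw [hqr, PySem.Chars.join_cons_cons]
      simp

theorem pvPyRange_one (n : Nat) :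
    PySem.List.pyRange 1 ((n : Int) + 1) = (List.range n).map (fun k : Nat => ((k : Int) + 1)) := by
  induction n with
  | zero => simp [PySem.List.pyRange_one_eq_nil]
  | succ m ih =>
    have h1 : (1 : Int) ≤ (m : Int) + 1 := by omega
    have : ((m + 1 : Nat) : Int) + 1 = ((m : Int) + 1) + 1 := by push_cast; ring
    rw [this, PySem.List.pyRange_one_succ_right h1, ih, List.range_succ]
    simp

theorem pvMain (parts0 : List (List Char)) (pfx : List Char) :
    (PySem.List.slice ((parts0.foldl pvStep ([pfx], pfx)).1) (some 1) none).map String.ofList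
      =
    (PySem.List.pyRange 1 (((parts0.filter (fun p => ¬ p = [])).length : Int) + 1)).map
      (fun i => String.ofList
        (pfx ++ '/' :: PySem.Chars.join ['/'] (PySem.List.slice (parts0.filter (fun p => ¬ p = [])) none (some i)))) := by
  set parts := parts0.filter (fun p => ¬ p = []) with hparts
  have hne : ∀ p ∈ parts, ¬ p = [] := by
    intro p hp
    rw [hparts] at hp
    simpa using (List.of_mem_filter hp)
  rw [pvFoldl_filter, ← hparts, pvFoldl_chain parts [pfx] pfx hne]
  rw [List.singleton_append, PySem.List.slice_from_one, List.tail_cons]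
  rw [pvChain_eq_map parts pfx, pvPyRange_one parts.length]
  rw [List.map_map, List.map_map]
  apply List.map_congr_left
  intro k hk
  simp only [List.mem_range] at hk
  have hsl : PySem.List.slice parts none (some ((k : Int) + 1)) = parts.take (k + 1) := by
    rw [PySem.List.slice_to parts (by omega : (0:Int) ≤ (k : Int) + 1)]
    have h1 : ((k : Int) + 1).toNat = k + 1 := by omega
    rw [h1]
  simp [hsl]

-- ===== VERDICT (by name: the statement is the Claim_ definition above) =====
theorem iter_resource_tree_uris_spec : Claim_equal_iter_resource_tree_uris := by
  intro root_uri _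
  unfold Spec_iter_resource_tree_uris iter_resource_tree_uris iter_resource_tree_uris_alt
  by_cases hg : PySem.Chars.startswith (pvRstripSlash root_uri.toList) "viking://resources".toList = false
  · rw [if_pos hg, if_pos hg]
  · rw [if_neg hg, if_neg hg]
    exact pvMain
      (PySem.Chars.splitOn
        (PySem.Chars.stripChars
          (PySem.Chars.slice (pvRstripSlash root_uri.toList)
            (some (("viking://resources".toList.length : Int))) none) "/".toList)
        "/".toList)
      "viking://resources".toList
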